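-- pv_equiv track=rewrite | github.com/WarshallG/Parallel-String-Matching | parallel_matching.py | compute_witness_serial
-- ===== SOURCE A (Python) =====
-- def compute_witness_serial(pattern, m):
--     wit_length = m // 2 + 1 if m % 2 == 0 else m // 2 + 2
--     wit = [0] * (wit_length)
--
--     for j in range(1, wit_length):
--         if j == 1:
--             wit[j] = 0  # WIT(1) 定义为 0
--             continue
--
--         for w in range(1, m - j + 2):
--             if pattern[j - 1 + w - 1] != pattern[w - 1]:  # 找到第一个失配位置
--                 wit[j] = w
--                 break
--         else:
--             wit[j] = 0  # 完全匹配
--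
--     return wit
-- ===== SOURCE B (Python) =====
-- def compute_witness_serial(pattern, m):
--     wit_length = m // 2 + 1 if m % 2 == 0 else m // 2 + 2
--     if wit_length <= 2:
--         return [0] * wit_length
--     s = pattern[:m]
--     n = len(s)
--     # Z-algorithm: z[i] = length of the longest common prefix of s and s[i:]
--     z = [0] * n
--     l = r = 0
--     for i in range(1, n):
--         k = min(r - i, z[i - l]) if i < r else 0
--         while i + k < n and s[k] == s[i + k]:
--             k += 1
--         z[i] = k
--         if i + k > r:
--             l, r = i, i + k
--     return [0, 0] + [0 if z[j - 1] >= m - j + 1 else z[j - 1] + 1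
--                      for j in range(2, wit_length)]
-- ===== Notes on version B (the rewrite author's own statement) =====
-- stated objective: faster
-- what changed: Replaces the per-shift rescan (for each j, compare the shifted pattern character by character from scratch) by a single Z-algorithm pass that computes all longest-common-prefix lengths in linear time, from which each witness entry is read off directly.
-- outside the precondition, e.g. on compute_witness_serial('ab', 3): A returns [0, 0, 1], B returns [0, 0, 1]
import Mathlib
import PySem

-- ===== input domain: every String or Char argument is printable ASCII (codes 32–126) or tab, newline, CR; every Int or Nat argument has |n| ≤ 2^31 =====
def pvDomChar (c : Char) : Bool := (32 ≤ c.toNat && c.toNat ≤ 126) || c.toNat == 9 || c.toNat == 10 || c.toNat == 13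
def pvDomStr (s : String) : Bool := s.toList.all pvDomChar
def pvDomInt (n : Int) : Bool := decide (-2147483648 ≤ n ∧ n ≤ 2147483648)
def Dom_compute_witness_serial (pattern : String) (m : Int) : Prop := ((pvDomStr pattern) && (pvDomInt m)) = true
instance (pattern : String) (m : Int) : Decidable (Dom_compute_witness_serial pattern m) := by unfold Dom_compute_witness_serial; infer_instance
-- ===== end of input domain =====

-- B replaces A's per-shift quadratic rescans by one linear Z-algorithm pass (equivalence is about the return value; neither mutates its arguments).

-- ===== PORT A =====
-- inner 'for w in range(1, m-j+2): if pattern[j-1+w-1] != pattern[w-1]: wit[j]=w; break else: wit[j]=0'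
-- c counts the remaining iterations; indices are in range under Pre_, so getD is exact there
def pvA_scan (cs : List Char) (j : Nat) (w : Nat) (c : Nat) : Int :=
  match c with
  | 0 => 0
  | c + 1 =>
    if cs.getD (j - 1 + w - 1) ' ' ≠ cs.getD (w - 1) ' ' then (w : Int)
    else pvA_scan cs j (w + 1) c

def compute_witness_serial (pattern : String) (m : Int) : List Int :=
  let wit_length : Int :=
    if PySem.Int.mod m 2 = 0 then PySem.Int.floordiv m 2 + 1 else PySem.Int.floordiv m 2 + 2
  let wit : List Int := List.replicate wit_length.toNat 0   -- [0] * wit_length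
  (PySem.List.pyRange 1 wit_length 1).foldl
    (fun wit j =>
      if j = 1 then wit.set 1 0
      else wit.set j.toNat (pvA_scan pattern.toList j.toNat 1 (m - j + 1).toNat))
    wit

-- ===== PORT B =====
-- 'while i + k < n and s[k] == s[i+k]: k += 1' ; fuel = n bounds the iterations
def pvB_extend (s : List Char) (i : Nat) (k : Nat) (fuel : Nat) : Nat :=
  match fuel with
  | 0 => k
  | fuel + 1 =>
    if i + k < s.length ∧ s.getD k ' ' = s.getD (i + k) ' ' then pvB_extend s i (k + 1) fuel
    else k

-- one iteration of the Z-algorithm loop; state = (z, l, r)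
def pvB_zstep (s : List Char) (st : List Nat × Nat × Nat) (i : Nat) : List Nat × Nat × Nat :=
  let z := st.1
  let l := st.2.1
  let r := st.2.2
  let k0 := if i < r then min (r - i) (z.getD (i - l) 0) else 0
  let k := pvB_extend s i k0 s.length
  let z' := z.set i k
  if r < i + k then (z', i, i + k) else (z', l, r)

def compute_witness_serial_alt (pattern : String) (m : Int) : List Int :=
  let wit_length : Int :=
    if PySem.Int.mod m 2 = 0 then PySem.Int.floordiv m 2 + 1 else PySem.Int.floordiv m 2 + 2
  if wit_length ≤ 2 then List.replicate wit_length.toNat 0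
  else
    let s := pattern.toList.take m.toNat    -- pattern[:m]; exact since m > 0 in this branch
    let n := s.length
    let z := ((List.range' 1 (n - 1)).foldl (pvB_zstep s) (List.replicate n 0, 0, 0)).1
    [0, 0] ++ (List.range' 2 (wit_length.toNat - 2)).map (fun (j : Nat) =>
      let zj : Int := (z.getD (j - 1) 0 : Nat)
      if (m - (j : Int) + 1) ≤ zj then 0 else zj + 1)

-- ===== PRECONDITION & SPEC =====
-- Pre_ excludes inputs with 2 < m and m > len(pattern): there A's scans generally run past the end of
-- pattern and raise IndexError; on the content-dependent subset of them where an early mismatch still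
-- lets A return, B happens to agree, but that subset is not a closed-form condition on the input.
def Pre_compute_witness_serial (pattern : String) (m : Int) : Prop :=
  m ≤ (pattern.toList.length : Int) ∨ m ≤ 2
instance (pattern : String) (m : Int) : Decidable (Pre_compute_witness_serial pattern m) := by
  unfold Pre_compute_witness_serial; infer_instance

def pvWitness_compute_witness_serial : String × Int := ("abaab", 5)

def Spec_compute_witness_serial (pattern : String) (m : Int) (out : List Int) : Prop :=
  out = compute_witness_serial_alt pattern m
instance (pattern : String) (m : Int) (out : List Int) : Decidable (Spec_compute_witness_serial pattern m out) := by
  unfold Spec_compute_witness_serial; infer_instance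

-- ===== CLAIM (what is proved, stated in full; the proofs are below) =====
def Claim_equal_compute_witness_serial : Prop := ∀ (pattern : String) (m : Int), Dom_compute_witness_serial pattern m → Pre_compute_witness_serial pattern m → Spec_compute_witness_serial pattern m (compute_witness_serial pattern m)

-- ===== LEMMAS AND PROOFS =====

-- length of the longest common prefix of two lists
def pvLcp : List Char → List Char → Nat
  | a :: as, b :: bs => if a = b then pvLcp as bs + 1 else 0
  | _, _ => 0

-- match length of shift i: lcp of s with its suffix s[i:]
def pvML (s : List Char) (i : Nat) : Nat := pvLcp s (s.drop i)

lemma pvLcp_le_right : ∀ xs ys : List Char, pvLcp xs ys ≤ ys.length := by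
  intro xs
  induction xs with
  | nil => intro ys; cases ys <;> simp [pvLcp]
  | cons a as ih =>
    intro ys
    cases ys with
    | nil => simp [pvLcp]
    | cons b bs =>
      by_cases h : a = b <;> simp only [pvLcp, h, if_true, if_false, List.length_cons]
      · exact Nat.succ_le_succ (ih bs)
      · omega

lemma pvLcp_getD (d : Char) : ∀ (xs ys : List Char) (p : Nat), p < pvLcp xs ys →
    xs.getD p d = ys.getD p d := by
  intro xs
  induction xs with
  | nil => intro ys p hp; cases ys <;> simp [pvLcp] at hp
  | cons a as ih =>
    intro ys p hp
    cases ys with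
    | nil => simp [pvLcp] at hp
    | cons b bs =>
      by_cases h : a = b
      · cases p with
        | zero => simpa using h
        | succ p =>
          simp only [pvLcp, h, if_true] at hp
          simpa using ih bs p (by omega)
      · simp [pvLcp, h] at hp

lemma pvLcp_decomp : ∀ (k : Nat) (xs ys : List Char), xs.take k = ys.take k →
    k ≤ xs.length → k ≤ ys.length →
    pvLcp xs ys = k + pvLcp (xs.drop k) (ys.drop k) := by
  intro k
  induction k with
  | zero => intro xs ys _ _ _; simp
  | succ k ih =>
    intro xs ys htake hx hy
    cases xs with
    | nil => simp at hx
    | cons a as =>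
      cases ys with
      | nil => simp at hy
      | cons b bs =>
        simp only [List.take_succ_cons, List.cons.injEq] at htake
        obtain ⟨rfl, htk⟩ := htake
        simp only [pvLcp, if_true, List.drop_succ_cons]
        rw [ih as bs htk (by simpa using hx) (by simpa using hy)]
        omega

lemma pvML_le (s : List Char) (i : Nat) : pvML s i ≤ s.length - i := by
  simpa using pvLcp_le_right s (s.drop i)

lemma pv_getD_drop (s : List Char) (n i : Nat) (d : Char) (h : n + i < s.length) :
    (s.drop n).getD i d = s.getD (n + i) d := by
  rw [List.getD_eq_getElem s d h, List.getD_eq_getElem (l := s.drop n) d (by simp; omega)]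
  exact List.getElem_drop ..

lemma pv_getD_take (s : List Char) (n i : Nat) (d : Char) (h : i < n) :
    (s.take n).getD i d = s.getD i d := by
  by_cases h2 : i < s.length
  · rw [List.getD_eq_getElem s d h2, List.getD_eq_getElem (l := s.take n) d (by simp; omega)]
    exact List.getElem_take ..
  · rw [List.getD_eq_default s d (by omega), List.getD_eq_default (l := s.take n) d (by simp; omega)]

lemma pv_getD_set {α : Type} [Inhabited α] (l : List α) (i t : Nat) (v : α) :
    (l.set i v).getD t default = if t = i ∧ i < l.length then v else l.getD t default := by
  split_ifs with h
  · obtain ⟨rfl, hi⟩ := h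
    rw [List.getD_eq_getElem (l := l.set t v) default (by simpa using hi)]
    exact List.getElem_set_self (by simpa using hi)
  · by_cases ht : t < l.length
    · rw [List.getD_eq_getElem l default ht, List.getD_eq_getElem (l := l.set i v) default (by simpa using ht)]
      exact List.getElem_set_ne (by intro he; exact h ⟨he.symm, by omega⟩) ..
    · rw [List.getD_eq_default l default (by omega), List.getD_eq_default (l := l.set i v) default (by simp; omega)]

-- head characterization of the lcp of two suffixes (i ≥ 1)
lemma pvLcp_drop_char (s : List Char) (i k : Nat) (hi : 1 ≤ i) :
    pvLcp (s.drop k) (s.drop (i + k)) =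
      if i + k < s.length then
        (if s.getD k ' ' = s.getD (i + k) ' '
         then pvLcp (s.drop (k + 1)) (s.drop (i + k + 1)) + 1 else 0)
      else 0 := by
  by_cases h1 : i + k < s.length
  · have hk : k < s.length := by omega
    rw [if_pos h1, List.getD_eq_getElem s ' ' hk, List.getD_eq_getElem s ' ' h1]
    rw [List.drop_eq_getElem_cons h1, List.drop_eq_getElem_cons hk]
    by_cases h : s[k] = s[i + k]
    · rw [if_pos h]; simp [pvLcp, h]
    · rw [if_neg h]; simp [pvLcp, h]
  · rw [if_neg h1, List.drop_eq_nil_of_le (as := s) (i := i + k) (by omega)]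
    cases s.drop k <;> simp [pvLcp]

-- the while loop computes exactly the remaining lcp
lemma pvB_extend_eq (s : List Char) (i : Nat) (hi : 1 ≤ i) :
    ∀ (fuel k : Nat), s.length ≤ i + k + fuel →
      pvB_extend s i k fuel = k + pvLcp (s.drop k) (s.drop (i + k)) := by
  intro fuel
  induction fuel with
  | zero =>
    intro k hlen
    rw [pvLcp_drop_char s i k hi, if_neg (by omega)]
    simp [pvB_extend]
  | succ fuel ih =>
    intro k hlen
    rw [pvB_extend]
    split_ifs with h
    · rw [ih (k + 1) (by omega)]
      rw [pvLcp_drop_char s i k hi, if_pos h.1,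
        List.getD_eq_getElem s ' ' (by omega), List.getD_eq_getElem s ' ' h.1]
      rw [if_pos (by
        have := h.2
        rwa [List.getD_eq_getElem s ' ' (by omega), List.getD_eq_getElem s ' ' h.1] at this)]
      have h3 : i + (k + 1) = i + k + 1 := by omega
      rw [h3]; omega
    · rw [pvLcp_drop_char s i k hi]
      rcases Classical.em (i + k < s.length) with h1 | h1
      · have h2 : ¬ s.getD k ' ' = s.getD (i + k) ' ' := fun he => h ⟨h1, he⟩
        rw [if_pos h1, if_neg h2]; omega
      · rw [if_neg h1]; omega

-- pointwise prefix match turns the starting value k0 into a decomposition of pvML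
lemma pvML_decomp_of_pointwise (s : List Char) (i k0 : Nat)
    (hk : i + k0 ≤ s.length)
    (hpt : ∀ p, p < k0 → s.getD (i + p) ' ' = s.getD p ' ') :
    pvML s i = k0 + pvLcp (s.drop k0) (s.drop (i + k0)) := by
  have htake : s.take k0 = (s.drop i).take k0 := by
    apply List.ext_getElem
    · simp; omega
    · intro p hp1 hp2
      have hp : p < k0 := by simp at hp1; omega
      have hip : i + p < s.length := by omega
      rw [List.getElem_take, List.getElem_take]
      rw [List.getElem_drop]
      have := (hpt p hp).symm
      rwa [List.getD_eq_getElem s ' ' hip, List.getD_eq_getElem s ' ' (by omega)] at this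
  have := pvLcp_decomp k0 s (s.drop i) htake (by omega) (by simp; omega)
  rw [pvML, this, List.drop_drop]

-- invariant of the Z loop before iteration i
def pvInv (s : List Char) (i : Nat) (st : List Nat × Nat × Nat) : Prop :=
  st.1.length = s.length ∧
  (∀ j, 1 ≤ j → j < i → st.1.getD j 0 = pvML s j) ∧
  st.2.1 < i ∧
  st.2.2 ≤ s.length ∧
  (0 < st.2.2 → 1 ≤ st.2.1 ∧ st.2.2 = st.2.1 + pvML s st.2.1)

lemma pvB_zstep_inv (s : List Char) (i : Nat) (st : List Nat × Nat × Nat)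
    (hi : 1 ≤ i) (hin : i < s.length) (h : pvInv s i st) :
    pvInv s (i + 1) (pvB_zstep s st i) := by
  obtain ⟨z, l, r⟩ := st
  obtain ⟨hlen, hz, hl, hr, hwin⟩ := h
  simp only at hlen hz hl hr hwin
  unfold pvB_zstep
  dsimp only
  set k0 := if i < r then min (r - i) (z.getD (i - l) 0) else 0 with hk0def
  have hk0le : i + k0 ≤ s.length := by
    rw [hk0def]; split_ifs with hir
    · have h1 := Nat.min_le_left (r - i) (z.getD (i - l) 0)
      omega
    · omega
  have hpt : ∀ p, p < k0 → s.getD (i + p) ' ' = s.getD p ' ' := by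
    intro p hp0
    have hip : i + p < s.length := by omega
    rw [hk0def] at hp0
    by_cases hir : i < r
    · rw [if_pos hir] at hp0
      obtain ⟨hl1, hrw⟩ := hwin (by omega)
      have hil : 1 ≤ i - l := by omega
      have hzv : z.getD (i - l) 0 = pvML s (i - l) := hz (i - l) hil (by omega)
      rw [hzv] at hp0
      have hp1 : p < r - i := lt_of_lt_of_le hp0 (Nat.min_le_left _ _)
      have hp2 : p < pvML s (i - l) := lt_of_lt_of_le hp0 (Nat.min_le_right _ _)
      have hq : i - l + p < pvML s l := by omega
      have e1 : s.getD (i - l + p) ' ' = (s.drop l).getD (i - l + p) ' ' :=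
        pvLcp_getD ' ' s (s.drop l) _ hq
      have e2 : (s.drop l).getD (i - l + p) ' ' = s.getD (l + (i - l + p)) ' ' :=
        pv_getD_drop s l _ ' ' (by omega)
      have e3 : l + (i - l + p) = i + p := by omega
      have e4 : s.getD p ' ' = (s.drop (i - l)).getD p ' ' :=
        pvLcp_getD ' ' s (s.drop (i - l)) p hp2
      have hml : pvML s (i - l) ≤ s.length - (i - l) := pvML_le s (i - l)
      have e5 : (s.drop (i - l)).getD p ' ' = s.getD (i - l + p) ' ' :=
        pv_getD_drop s (i - l) p ' ' (by omega)
      have E1 : s.getD (i + p) ' ' = s.getD (i - l + p) ' ' := by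
        rw [← e3, ← e2, ← e1]
      exact E1.trans (e4.trans e5).symm
    · rw [if_neg hir] at hp0; omega
  have hkml : pvB_extend s i k0 s.length = pvML s i := by
    rw [pvB_extend_eq s i hi s.length k0 (by omega)]
    exact (pvML_decomp_of_pointwise s i k0 hk0le hpt).symm
  rw [hkml]
  have hkle : i + pvML s i ≤ s.length := by have := pvML_le s i; omega
  have hzlen : i < z.length := by omega
  have hzget : ∀ j, 1 ≤ j → j < i + 1 → (z.set i (pvML s i)).getD j 0 = pvML s j := by
    intro j hj1 hj2
    have h0 : (0 : Nat) = default := rfl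
    rcases Nat.lt_or_ge j i with hji | hji
    · rw [h0, pv_getD_set, if_neg (by omega), ← h0]
      exact hz j hj1 hji
    · have : j = i := by omega
      subst this
      rw [h0, pv_getD_set, if_pos ⟨rfl, hzlen⟩]
  split_ifs with hbr
  · refine ⟨by simpa using hlen, hzget, ?_, ?_, ?_⟩
    · show i < i + 1; omega
    · show i + pvML s i ≤ s.length; exact hkle
    · intro _; exact ⟨hi, rfl⟩
  · refine ⟨by simpa using hlen, hzget, ?_, ?_, ?_⟩
    · show l < i + 1; omega
    · exact hr
    · exact hwin

lemma pvB_zfold_inv (s : List Char) :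
    ∀ c, 1 + c ≤ s.length →
      pvInv s (1 + c) ((List.range' 1 c).foldl (pvB_zstep s) (List.replicate s.length 0, 0, 0)) := by
  intro c
  induction c with
  | zero =>
    intro _
    rw [show List.range' 1 0 = [] from rfl, List.foldl_nil]
    refine ⟨by simp, ?_, ?_, ?_, ?_⟩
    · intro j hj1 hj2; omega
    · show (0 : Nat) < 1; omega
    · show (0 : Nat) ≤ s.length; omega
    · intro h; exact absurd (show (0 : Nat) < 0 from h) (by omega)
  | succ c ih =>
    intro hc
    have hrange : List.range' 1 (c + 1) = List.range' 1 c ++ [1 + c] := by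
      simpa using (List.range'_concat (s := 1) (n := c) (step := 1))
    rw [hrange, List.foldl_append]
    simp only [List.foldl_cons, List.foldl_nil]
    have := pvB_zstep_inv s (1 + c) _ (by omega) (by omega) (ih (by omega))
    simpa [Nat.add_comm] using this

-- A's inner scan in terms of pvLcp
lemma pvA_scan_eq (cs : List Char) (M : Nat) (hM : M ≤ cs.length) (j : Nat) (hj : 2 ≤ j) :
    ∀ (c w : Nat), 1 ≤ w → j - 2 + w + c ≤ M →
      pvA_scan cs j w c =
        if c ≤ pvLcp ((cs.take M).drop (w - 1)) ((cs.take M).drop (j - 2 + w)) then 0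
        else (w : Int) + pvLcp ((cs.take M).drop (w - 1)) ((cs.take M).drop (j - 2 + w)) := by
  intro c
  induction c with
  | zero =>
    intro w hw hbound
    simp [pvA_scan]
  | succ c ih =>
    intro w hw hbound
    have hsl : (cs.take M).length = M := by simp; omega
    have hidx : j - 2 + w < M := by omega
    have hw1 : w - 1 < M := by omega
    have hchar := pvLcp_drop_char (cs.take M) (j - 1) (w - 1) (by omega)
    have hjw : j - 1 + (w - 1) = j - 2 + w := by omega
    rw [hjw, hsl] at hchar
    have hg1 : (cs.take M).getD (w - 1) ' ' = cs.getD (w - 1) ' ' := pv_getD_take cs M _ ' ' hw1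
    have hg2 : (cs.take M).getD (j - 2 + w) ' ' = cs.getD (j - 2 + w) ' ' := pv_getD_take cs M _ ' ' hidx
    rw [if_pos hidx, hg1, hg2] at hchar
    rw [pvA_scan]
    have hidx2 : j - 1 + w - 1 = j - 2 + w := by omega
    rw [hidx2]
    by_cases he : cs.getD (j - 2 + w) ' ' = cs.getD (w - 1) ' '
    · rw [if_neg (by simpa using he)]
      rw [ih (w + 1) (by omega) (by omega)]
      rw [hchar, if_pos he.symm]
      have hs1 : w + 1 - 1 = w - 1 + 1 := by omega
      have hs2 : j - 2 + (w + 1) = j - 2 + w + 1 := by omega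
      rw [hs1, hs2]
      split_ifs with h1 h2 h2
      · rfl
      · omega
      · omega
      · push_cast; ring
    · rw [if_pos (by simpa using he)]
      have hch0 : pvLcp ((cs.take M).drop (w - 1)) ((cs.take M).drop (j - 2 + w)) = 0 := by
        rw [hchar, if_neg (show ¬cs.getD (w - 1) ' ' = cs.getD (j - 2 + w) ' ' from fun x => he x.symm)]
      rw [hch0, if_neg (show ¬(c + 1 ≤ 0) by omega)]
      simp

-- generic facts about A's fold of list.set over a range
lemma pv_length_foldl_set (l : List Int) (g : Int → Int) :
    ∀ init : List Int,
      (l.foldl (fun w j => w.set j.toNat (g j)) init).length = init.length := by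
  induction l with
  | nil => intro init; rfl
  | cons x xs ih => intro init; rw [List.foldl_cons, ih]; simp

lemma pv_foldl_set_getD (g : Int → Int) :
    ∀ (c : Nat) (a : Int) (init : List Int) (t : Nat), 0 ≤ a →
      ((PySem.List.pyRange a (a + c) 1).foldl (fun w j => w.set j.toNat (g j)) init).getD t 0 =
        if a ≤ (t : Int) ∧ (t : Int) < a + c ∧ t < init.length then g (t : Int)
        else init.getD t 0 := by
  intro c
  induction c with
  | zero =>
    intro a init t ha
    rw [show (a + ((0 : Nat) : Int)) = a by push_cast; ring]
    rw [PySem.List.pyRange_one_eq_nil (le_refl a), List.foldl_nil]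
    rw [if_neg (by omega)]
  | succ c ih =>
    intro a init t ha
    have hsplit : PySem.List.pyRange a (a + ((c + 1 : Nat) : Int)) 1
        = PySem.List.pyRange a (a + (c : Nat)) 1 ++ [a + (c : Nat)] := by
      have h1 : (a + ((c + 1 : Nat) : Int)) = (a + (c : Nat)) + 1 := by push_cast; ring
      rw [h1, PySem.List.pyRange_one_succ_right (by omega)]
    rw [hsplit, List.foldl_append]
    simp only [List.foldl_cons, List.foldl_nil]
    have h0 : (0 : Int) = default := rfl
    rw [h0, pv_getD_set, ← h0, pv_length_foldl_set, ih a init t ha]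
    have hac : ((a + (c : Nat)).toNat : Int) = a + (c : Nat) := by omega
    split_ifs with h1 h2 h3 h4 h5 <;> try rfl
    · rw [show ((t : Int)) = a + (c : Nat) by omega]
    · omega
    · omega
    · omega

-- ===== VERDICT (by name: the statement is the Claim_ definition above) =====
theorem compute_witness_serial_spec : Claim_equal_compute_witness_serial := by
  intro pattern m _ hpre
  unfold Spec_compute_witness_serial compute_witness_serial compute_witness_serial_alt
  have hdm := PySem.Int.floordiv_mul_add_mod m 2
  have hm0 := PySem.Int.mod_nonneg m (by norm_num : (0 : Int) < 2)
  have hm1 := PySem.Int.mod_lt m (by norm_num : (0 : Int) < 2)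
  set cs := pattern.toList with hcs
  set L : Int := if PySem.Int.mod m 2 = 0 then PySem.Int.floordiv m 2 + 1
    else PySem.Int.floordiv m 2 + 2 with hLdef
  have hLfacts : (m ≤ 2 → L ≤ 2) ∧ (3 ≤ m → 3 ≤ L ∧ L ≤ m) := by
    constructor
    · intro h; rw [hLdef]; split_ifs with hp <;> omega
    · intro h; rw [hLdef]; constructor <;> [skip; skip] <;> split_ifs with hp <;> omega
  by_cases hm3 : 3 ≤ m
  · -- main case: 3 ≤ m ≤ len(pattern)
    obtain ⟨hL3, hLm⟩ := hLfacts.2 hm3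
    have hmlen : m ≤ (cs.length : Int) := by
      rcases hpre with h | h
      · exact h
      · omega
    set M := m.toNat with hMdef
    have hMlen : M ≤ cs.length := by omega
    set s := cs.take M with hsdef
    have hslen : s.length = M := by rw [hsdef]; simp; omega
    -- B side: main branch
    rw [if_neg (by omega : ¬ L ≤ 2)]
    dsimp only
    -- z values
    have hinv := pvB_zfold_inv s (s.length - 1) (by omega)
    rw [show 1 + (s.length - 1) = M by omega] at hinv
    obtain ⟨hzlen, hzget, -, -, -⟩ := hinv
    -- A side: peel j = 1, then plain set-fold
    rw [PySem.List.pyRange_one_cons (by omega : (1 : Int) < L), List.foldl_cons,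
      if_pos (rfl : (1 : Int) = 1),
      show (List.replicate L.toNat (0 : Int)).set 1 0 = List.replicate L.toNat 0 from
        List.set_replicate_self,
      show (1 : Int) + 1 = 2 from rfl]
    rw [PySem.List.foldl_congr_mem (PySem.List.pyRange 2 L 1) _
      (fun w j => w.set j.toNat (pvA_scan cs j.toNat 1 (m - j + 1).toNat))
      (List.replicate L.toNat 0)
      (by
        intro acc x hx
        have hx2 : 2 ≤ x := (PySem.List.mem_pyRange_one.mp hx).1
        rw [if_neg (by omega)])]
    -- compare elementwise
    apply List.ext_getElem
    · rw [pv_length_foldl_set]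
      simp
      omega
    · intro t ht1 ht2
      have htL : t < L.toNat := by rwa [pv_length_foldl_set, List.length_replicate] at ht1
      have hA : ((PySem.List.pyRange 2 L 1).foldl
          (fun w j => w.set j.toNat (pvA_scan cs j.toNat 1 (m - j + 1).toNat))
          (List.replicate L.toNat 0)).getD t 0
          = if 2 ≤ (t : Int) ∧ (t : Int) < L ∧ t < L.toNat
            then pvA_scan cs t 1 (m - t + 1).toNat
            else 0 := by
        have := pv_foldl_set_getD (fun j => pvA_scan cs j.toNat 1 (m - j + 1).toNat)
          (L - 2).toNat 2 (List.replicate L.toNat 0) t (by omega)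
        rw [show ((2 : Int) + ((L - 2).toNat : Int)) = L by omega] at this
        simp only [List.length_replicate] at this
        rw [this]
        split_ifs with h1
        · simp
        · rw [List.getD_eq_getElem (l := List.replicate L.toNat (0 : Int)) 0 (by simpa using htL)]
          simp
      rw [← List.getD_eq_getElem _ 0 ht1, hA]
      by_cases ht2' : 2 ≤ t
      · -- body entries
        have htm : (t : Int) < L := by omega
        rw [if_pos ⟨by omega, htm, htL⟩]
        have htM : t < M := by omega
        -- B entry
        have hBL : 2 ≤ t → t - 2 < L.toNat - 2 := by omega
        rw [List.getElem_append_right (by simpa using ht2')]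
        simp only [List.getElem_map, List.getElem_range']
        rw [show 2 + 1 * (t - ([0, 0] : List Int).length) = t by simp; omega]
        have hzv : (((List.range' 1 (s.length - 1)).foldl (pvB_zstep s)
            (List.replicate s.length 0, 0, 0)).1).getD (t - 1) 0 = pvML s (t - 1) :=
          hzget (t - 1) (by omega) (by omega)
        simp only [hzv]
        -- A entry via scan lemma
        have hscan := pvA_scan_eq cs M hMlen t ht2' (m - t + 1).toNat 1 (by omega) (by omega)
        rw [show t - 2 + 1 = t - 1 from by omega] at hscan
        rw [show (1 : Nat) - 1 = 0 from rfl, List.drop_zero] at hscan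
        rw [hscan]
        have hml : pvLcp s (s.drop (t - 1)) = pvML s (t - 1) := rfl
        rw [← hsdef, hml]
        have hmlle : pvML s (t - 1) ≤ M - (t - 1) := by
          have := pvML_le s (t - 1); omega
        split_ifs with h1 h2 h2
        · rfl
        · omega
        · omega
        · push_cast; ring
      · -- t = 0 or 1
        rw [if_neg (by omega)]
        interval_cases t
        · rfl
        · rfl
  · -- small case: m ≤ 2, witness list is all zeros and no inner scan runs
    have hm2 : m ≤ 2 := by omega
    have hL2 : L ≤ 2 := hLfacts.1 hm2
    rw [if_pos hL2]
    dsimp only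
    rcases Classical.em (L ≤ 1) with h1 | h1
    · rw [PySem.List.pyRange_one_eq_nil (by omega : L ≤ 1), List.foldl_nil]
    · have : L = 2 := by omega
      rw [this, show (2 : Int) = 1 + 1 from rfl, PySem.List.pyRange_one_singleton]
      simp only [List.foldl_cons, List.foldl_nil]
      exact List.set_replicate_self
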